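-- pv_equiv track=rewrite | github.com/sdammal/Lyrics-Analysis-and-Generation | website/myapp/processing_functions.py | count_curse_words
-- ===== SOURCE A (Python) =====
-- def count_curse_words(lyrics):
--     '''
--     given a list of strings as lyrics and a list of strings for curse_words,
--     return the count of every curse word which has appeared.
--     return variable should be a dictionary where key will be the curse word and value will be its count
--     '''
--
--     curse_words = ["fuck", "shit", "bitch", "anal", "ass", "shitbag", "asshole", "bastard", "damn", "bollocks"]
--
--     curse_word_counts = {curse_word: 0 for curse_word in curse_words}
--
--     for lyric in lyrics:
--         words = lyric.split()
--
--         for word in words: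
--             if word.lower() in curse_words:
--                 curse_word_counts[word.lower()] += 1
--     # dont return the items which are zero
--     curse_word_counts = {word: count for word, count in curse_word_counts.items() if count > 0}
--
--     curse_word_counts = dict(sorted(curse_word_counts.items(), key=lambda item: item[1], reverse=True))
--
--     return curse_word_counts
-- ===== SOURCE B (Python) =====
-- def count_curse_words(lyrics):
--     curse_words = "fuck shit bitch anal ass shitbag asshole bastard damn bollocks".split()
--     # tabulate the WHOLE vocabulary first, then select the curse words
--     counts = {}
--     for lyric in lyrics:
--         for w in lyric.split():
--             lw = w.lower()
--             counts[lw] = counts.get(lw, 0) + 1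
--     pairs = [(cw, counts[cw]) for cw in curse_words if counts.get(cw, 0) > 0]
--     pairs.sort(key=lambda p: p[1], reverse=True)
--     return dict(pairs)
-- ===== Notes on version B (the rewrite author's own statement) =====
-- stated objective: alternative
-- what changed: B drops A's per-word curse-list membership test and pre-initialized curse dict: it tabulates a counter over the ENTIRE lowercased vocabulary in one pass, then selects the fixed curse words from that table, filters positives and stable-sorts descending by count.
import Mathlib
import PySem

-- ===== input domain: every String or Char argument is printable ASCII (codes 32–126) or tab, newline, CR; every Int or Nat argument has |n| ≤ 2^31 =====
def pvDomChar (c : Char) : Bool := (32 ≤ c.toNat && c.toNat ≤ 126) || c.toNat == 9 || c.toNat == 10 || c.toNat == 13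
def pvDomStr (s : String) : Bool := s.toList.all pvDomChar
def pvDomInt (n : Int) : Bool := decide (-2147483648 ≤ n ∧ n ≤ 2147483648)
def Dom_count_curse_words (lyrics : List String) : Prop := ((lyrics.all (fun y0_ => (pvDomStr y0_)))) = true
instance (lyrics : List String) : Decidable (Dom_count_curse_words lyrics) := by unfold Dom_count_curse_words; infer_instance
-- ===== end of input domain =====

-- B tabulates a counter over the WHOLE lowercased vocabulary in one pass, then selects the fixed
-- curse words from that table (objective: alternative decomposition; no membership test per word).

-- ===== PORT A =====
def curseWordsA : List String :=
  ["fuck", "shit", "bitch", "anal", "ass", "shitbag", "asshole", "bastard", "damn", "bollocks"]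

def count_curse_words (lyrics : List String) : List (String × Int) :=
  let curse_word_counts0 : PySem.Dict String Int :=
    curseWordsA.foldl (fun d cw => d.insert cw 0) PySem.Dict.empty
  let curse_word_counts :=
    lyrics.foldl (fun d lyric =>
      (PySem.Str.split₀ lyric).foldl (fun d word =>
        if curseWordsA.contains (PySem.Str.lower word) then
          d.modify (PySem.Str.lower word) 0 (· + 1)
        else d) d) curse_word_counts0
  let filtered := curse_word_counts.items.filter (fun p => p.2 > 0)
  PySem.List.sorted filtered (fun p => p.2) true

-- ===== PORT B =====
def count_curse_words_alt (lyrics : List String) : List (String × Int) :=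
  let curse_words := PySem.Str.split₀ "fuck shit bitch anal ass shitbag asshole bastard damn bollocks"
  let counts : PySem.Dict String Int :=
    lyrics.foldl (fun d lyric =>
      (PySem.Str.split₀ lyric).foldl (fun d w =>
        let lw := PySem.Str.lower w
        d.insert lw (d.getD lw 0 + 1)) d) PySem.Dict.empty
  let pairs := (curse_words.filter (fun cw => counts.getD cw 0 > 0)).map
      (fun cw => (cw, counts.getD cw 0))
  PySem.List.sorted pairs (fun p => p.2) true

-- ===== PRECONDITION & SPEC =====
def Spec_count_curse_words (lyrics : List String) (out : List (String × Int)) : Prop := out = count_curse_words_alt lyrics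
instance (lyrics : List String) (out : List (String × Int)) : Decidable (Spec_count_curse_words lyrics out) := by unfold Spec_count_curse_words; infer_instance

-- ===== CLAIM (what is proved, stated in full; the proofs are below) =====
def Claim_equal_count_curse_words : Prop := ∀ (lyrics : List String), Dom_count_curse_words lyrics → Spec_count_curse_words lyrics (count_curse_words lyrics)

-- ===== LEMMAS AND PROOFS =====

-- proof-side abbreviations
def pvInit : PySem.Dict String Int :=
  curseWordsA.foldl (fun d cw => d.insert cw 0) PySem.Dict.empty

def pvWords (lyrics : List String) : List String :=
  lyrics.flatMap (fun lyric => (PySem.Str.split₀ lyric).map PySem.Str.lower)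

lemma pvSet_update_of_subset {α : Type} [BEq α] [LawfulBEq α] (xs : List α) (s : PySem.Set α)
    (h : ∀ x ∈ xs, x ∈ s) : PySem.Set.update s xs = s := by
  induction xs generalizing s with
  | nil => rfl
  | cons x xs ih =>
      have hx : x ∈ s := h x (by simp)
      show PySem.Set.update (PySem.Set.add s x) xs = s
      rw [PySem.Set.add_of_mem hx]
      exact ih s (fun y hy => h y (by simp [hy]))

lemma pvInit_keys : pvInit.keys = curseWordsA := by decide

lemma pvInit_getD_zero (k : String) : pvInit.getD k 0 = 0 := by
  have h : pvInit = PySem.Dict.mk [("fuck", 0), ("shit", 0), ("bitch", 0), ("anal", 0),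
      ("ass", 0), ("shitbag", 0), ("asshole", 0), ("bastard", 0), ("damn", 0), ("bollocks", 0)] := by
    decide
  rw [h]
  simp only [PySem.Dict.getD_eq_get?_getD, PySem.Dict.get?_mk_cons]
  split_ifs <;> rfl

-- A's nested loop, re-expressed as one counting fold over the curse occurrences
lemma pvLoopA_eq (lyrics : List String) :
    lyrics.foldl (fun d lyric =>
      (PySem.Str.split₀ lyric).foldl (fun d word =>
        if curseWordsA.contains (PySem.Str.lower word) then
          d.modify (PySem.Str.lower word) 0 (· + 1)
        else d) d) pvInit
    = ((pvWords lyrics).filter (fun w => curseWordsA.contains w)).foldl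
        (fun d w => d.modify w 0 (· + 1)) pvInit := by
  rw [← PySem.List.foldl_if_eq_foldl_filter]
  unfold pvWords
  rw [List.foldl_flatMap]
  simp only [List.foldl_map]

-- A's filtered items: the curse words in fixed order with their total counts
lemma pvItemsA_eq (lyrics : List String) :
    (((pvWords lyrics).filter (fun w => curseWordsA.contains w)).foldl
        (fun d w => d.modify w 0 (· + 1)) pvInit).items
    = curseWordsA.map (fun k => (k, ((pvWords lyrics).count k : Int))) := by
  have hkeys : (((pvWords lyrics).filter (fun w => curseWordsA.contains w)).foldl
      (fun d w => d.modify w 0 (· + 1)) pvInit).keys = curseWordsA := by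
    rw [PySem.Dict.keys_foldl_modify, pvInit_keys]
    apply pvSet_update_of_subset
    intro x hx
    have := (List.mem_filter.mp hx).2
    simpa [List.contains_iff_mem] using this
  rw [PySem.Dict.items_eq_map_keys _ (by rw [hkeys]; decide) 0, hkeys]
  apply List.map_congr_left
  intro k hk
  rw [PySem.Dict.getD_foldl_modify_add_one, pvInit_getD_zero, zero_add]
  rw [List.count_filter]
  simp [hk]

-- B's vocabulary counter: the count it stores for any word is its count among all lowered words
lemma pvLoopB_getD (lyrics : List String) (v : String) :
    (lyrics.foldl (fun d lyric =>
      (PySem.Str.split₀ lyric).foldl (fun d w =>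
        d.insert (PySem.Str.lower w) (d.getD (PySem.Str.lower w) 0 + 1)) d)
      (PySem.Dict.empty : PySem.Dict String Int)).getD v 0
    = ((pvWords lyrics).count v : Int) := by
  have h : lyrics.foldl (fun d lyric =>
      (PySem.Str.split₀ lyric).foldl (fun d w =>
        d.insert (PySem.Str.lower w) (d.getD (PySem.Str.lower w) 0 + 1)) d)
      (PySem.Dict.empty : PySem.Dict String Int)
      = (pvWords lyrics).foldl (fun d x => d.insert x (d.getD x 0 + 1)) PySem.Dict.empty := by
    unfold pvWords
    rw [List.foldl_flatMap]
    simp only [List.foldl_map]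
  rw [h, PySem.Dict.getD_foldl_insert_add_one]
  simp [PySem.Dict.getD_eq_get?_getD, PySem.Dict.get?, PySem.Dict.empty]

lemma pvCurseSplit : PySem.Str.split₀ "fuck shit bitch anal ass shitbag asshole bastard damn bollocks" = curseWordsA := by decide

-- ===== VERDICT (by name: the statement is the Claim_ definition above) =====
theorem count_curse_words_spec : Claim_equal_count_curse_words := by
  unfold Claim_equal_count_curse_words
  intro lyrics _
  unfold Spec_count_curse_words
  simp only [count_curse_words, count_curse_words_alt]
  rw [show (curseWordsA.foldl (fun d cw => d.insert cw 0) PySem.Dict.empty) = pvInit from rfl,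
      pvLoopA_eq, pvItemsA_eq, pvCurseSplit]
  simp only [pvLoopB_getD]
  rw [List.filter_map]
  rfl
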